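-- pv_equiv track=rewrite | github.com/ErikSM/API-soccer-search_leagues--API-football-data.org | access/ApiAccess.py | _write_page_address
-- ===== SOURCE A (Python) =====
-- def _write_page_address(resources_tuple: tuple, page_search='all', code_id=''):
--     sub_resources_menu = dict()
--
--     resource_type = resources_tuple[0]
--     resources_list = resources_tuple[1]
--
--     for i in resources_list:
--         if i == 'all':
--             string_address = f'{code_id}'
--         elif i == 'particular':
--             string_address = f'{code_id}'
--         else:
--             string_address = f'{code_id}/{i}'
--         sub_resources_menu[i] = string_address
--
--     address = f'/{resource_type}/{sub_resources_menu[page_search]}'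
--
--     return address
-- ===== SOURCE B (Python) =====
-- def _write_page_address(resources_tuple: tuple, page_search='all', code_id=''):
--     resource_type, resources_list = resources_tuple
--     if page_search not in resources_list:
--         raise KeyError(page_search)
--     if page_search in ('all', 'particular'):
--         sub = f'{code_id}'
--     else:
--         sub = f'{code_id}/{page_search}'
--     return f'/{resource_type}/{sub}'
-- ===== Notes on version B (the rewrite author's own statement) =====
-- stated objective: simpler
-- what changed: Drops the dict and the loop over the whole resources list; after a membership check it computes the single requested address directly from page_search.
import Mathlib
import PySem

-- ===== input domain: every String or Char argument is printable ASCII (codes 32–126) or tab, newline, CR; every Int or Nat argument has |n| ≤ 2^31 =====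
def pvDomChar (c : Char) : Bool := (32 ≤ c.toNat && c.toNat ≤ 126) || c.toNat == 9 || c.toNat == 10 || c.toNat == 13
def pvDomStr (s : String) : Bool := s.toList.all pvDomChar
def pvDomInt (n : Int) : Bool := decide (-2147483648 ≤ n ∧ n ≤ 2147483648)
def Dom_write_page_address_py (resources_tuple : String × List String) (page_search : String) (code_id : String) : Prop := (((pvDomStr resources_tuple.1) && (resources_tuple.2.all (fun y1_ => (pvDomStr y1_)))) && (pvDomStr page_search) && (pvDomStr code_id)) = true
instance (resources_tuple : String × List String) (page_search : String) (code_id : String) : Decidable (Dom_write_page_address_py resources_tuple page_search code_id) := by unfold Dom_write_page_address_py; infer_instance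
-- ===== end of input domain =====

-- B drops A's dict-building loop: after checking page_search is among the resources it
-- computes the single requested address directly (simpler; same behaviour on Pre_).


-- ===== PORT A =====
-- per-element string_address, exactly A's if/elif/else
def pvAddrA (code_id : String) (i : String) : String :=
  if i = "all" then code_id
  else if i = "particular" then code_id
  else code_id ++ "/" ++ i

def write_page_address_py (resources_tuple : String × List String) (page_search : String) (code_id : String) : String :=
  let resource_type := resources_tuple.1
  let resources_list := resources_tuple.2
  let sub_resources_menu : PySem.Dict String String :=
    resources_list.foldl (fun d i => d.insert i (pvAddrA code_id i)) PySem.Dict.empty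
  -- sub_resources_menu[page_search]: KeyError when absent is excluded by Pre_; getD "" outside Pre_
  "/" ++ resource_type ++ "/" ++ sub_resources_menu.getD page_search ""

-- ===== PORT B =====
def write_page_address_py_alt (resources_tuple : String × List String) (page_search : String) (code_id : String) : String :=
  -- B raises KeyError when page_search ∉ resources_list (excluded by Pre_)
  let sub := if page_search = "all" ∨ page_search = "particular" then code_id
             else code_id ++ "/" ++ page_search
  "/" ++ resources_tuple.1 ++ "/" ++ sub

-- ===== PRECONDITION & SPEC =====
-- Pre_ excludes exactly the inputs where page_search is not in the resources list: there A
-- (dict lookup) and B (explicit guard) both raise KeyError.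
def Pre_write_page_address_py (resources_tuple : String × List String) (page_search : String) (code_id : String) : Prop :=
  page_search ∈ resources_tuple.2
instance (resources_tuple : String × List String) (page_search : String) (code_id : String) : Decidable (Pre_write_page_address_py resources_tuple page_search code_id) := by unfold Pre_write_page_address_py; infer_instance
def pvWitness_write_page_address_py : (String × List String) × String × String := (("competitions", ["all", "particular", "teams"]), "teams", "2021")

def Spec_write_page_address_py (resources_tuple : String × List String) (page_search : String) (code_id : String) (out : String) : Prop := out = write_page_address_py_alt resources_tuple page_search code_id
instance (resources_tuple : String × List String) (page_search : String) (code_id : String) (out : String) : Decidable (Spec_write_page_address_py resources_tuple page_search code_id out) := by unfold Spec_write_page_address_py; infer_instance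

-- ===== CLAIM (what is proved, stated in full; the proofs are below) =====
def Claim_equal_write_page_address_py : Prop := ∀ (resources_tuple : String × List String) (page_search : String) (code_id : String), Dom_write_page_address_py resources_tuple page_search code_id → Pre_write_page_address_py resources_tuple page_search code_id → Spec_write_page_address_py resources_tuple page_search code_id (write_page_address_py resources_tuple page_search code_id)

-- ===== LEMMAS AND PROOFS =====
theorem getD_foldl_insert_of_not_mem (l : List String) (f : String → String)
    (d : PySem.Dict String String) (k : String) (hk : k ∉ l) :
    (l.foldl (fun d i => d.insert i (f i)) d).getD k "" = d.getD k "" := by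
  induction l generalizing d with
  | nil => rfl
  | cons i t ih =>
    simp only [List.foldl_cons]
    rw [ih _ (fun h => hk (List.mem_cons_of_mem _ h)), PySem.Dict.getD_insert,
        if_neg (fun (h : k = i) => hk (h ▸ List.mem_cons_self ..))]

theorem getD_foldl_insert_of_mem (l : List String) (f : String → String)
    (d : PySem.Dict String String) (k : String) (hk : k ∈ l) :
    (l.foldl (fun d i => d.insert i (f i)) d).getD k "" = f k := by
  induction l generalizing d with
  | nil => cases hk
  | cons i t ih =>
    simp only [List.foldl_cons]
    by_cases h : k ∈ t
    · exact ih _ h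
    · have hki : k = i := by cases hk with | head => rfl | tail _ h' => exact absurd h' h
      rw [getD_foldl_insert_of_not_mem _ _ _ _ h, hki, PySem.Dict.getD_insert_self]

-- ===== VERDICT (by name: the statement is the Claim_ definition above) =====
theorem write_page_address_py_spec : Claim_equal_write_page_address_py := by
  intro ⟨rt, rl⟩ ps ci _ hpre
  unfold Spec_write_page_address_py write_page_address_py write_page_address_py_alt
  simp only
  rw [getD_foldl_insert_of_mem _ _ _ _ hpre]
  unfold pvAddrA
  split_ifs with h1 h2 h3 <;> simp_all
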